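-- pv_equiv track=rewrite | github.com/jano31415/codejam | codeforces/global_19/probe.py | solve
-- ===== SOURCE A (Python) =====
-- def solve(n,m, arr, pairs):
--     pairs = set(pairs)
--
--     counts = dict()
--     for a in arr:
--         if a not in counts:
--             counts[a] = 0
--         counts[a] += 1
--
--     count_to_val = {}
--     for k in counts:
--         if counts[k] not in count_to_val:
--             count_to_val[counts[k]] = []
--         count_to_val[counts[k]].append(k)
--
--     for k in count_to_val:
--         count_to_val[k].sort(reverse=True)
--
--     best_val = 0
--     for a in counts:
--         counta = counts[a]
--         for k in count_to_val:
--             candidates = count_to_val[k]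
--             for c in candidates:
--                 if a == c:
--                     continue
--                 if (a, c) in pairs or (c, a) in pairs:
--                     continue
--                 new_val = (counta + k) * (c+a)
--
--                 if new_val > best_val:
--                     best_val = new_val
--                 break
--     return best_val
-- ===== SOURCE B (Python) =====
-- def solve(n, m, arr, pairs):
--     forbidden = set(pairs)
--     counts = {}
--     for a in arr:
--         counts[a] = counts.get(a, 0) + 1
--     best = 0
--     for a, ca in counts.items():
--         for c, cc in counts.items():
--             if a != c and (a, c) not in forbidden and (c, a) not in forbidden:
--                 best = max(best, (ca + cc) * (a + c))
--     return best
-- ===== Notes on version B (the rewrite author's own statement) =====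
-- stated objective: simpler
-- what changed: Drops A's count-to-values grouping dict, per-group descending sorts and break-at-first-valid scan; B just builds the counts dict and takes the max of (ca+cc)*(a+c) over all valid distinct value pairs in one plain nested loop.
import Mathlib
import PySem

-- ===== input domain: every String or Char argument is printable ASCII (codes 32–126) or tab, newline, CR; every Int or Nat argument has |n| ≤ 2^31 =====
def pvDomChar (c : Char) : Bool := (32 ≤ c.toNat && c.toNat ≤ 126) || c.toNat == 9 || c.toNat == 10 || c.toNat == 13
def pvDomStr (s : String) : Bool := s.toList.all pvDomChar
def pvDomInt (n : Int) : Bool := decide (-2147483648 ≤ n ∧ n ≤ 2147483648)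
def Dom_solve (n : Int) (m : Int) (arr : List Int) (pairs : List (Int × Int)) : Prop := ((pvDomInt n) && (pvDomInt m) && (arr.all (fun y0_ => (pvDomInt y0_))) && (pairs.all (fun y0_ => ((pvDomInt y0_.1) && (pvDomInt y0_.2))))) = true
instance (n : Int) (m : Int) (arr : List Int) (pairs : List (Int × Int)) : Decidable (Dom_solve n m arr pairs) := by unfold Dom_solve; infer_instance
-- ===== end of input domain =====

-- B replaces A's count-grouping dict + per-group descending sort + break-at-first-valid scan
-- by one plain nested loop over the counts dict taking the max over all valid pairs (simpler).

-- ===== PORT A =====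
-- the inner 'for c in candidates: … break' loop of A (break = stop recursing)
def scanA (ps : List (Int × Int)) (a counta k best : Int) : List Int → Int
  | [] => best
  | c :: rest =>
    if a = c then scanA ps a counta k best rest
    else if ps.contains (a, c) || ps.contains (c, a) then scanA ps a counta k best rest
    else if (counta + k) * (c + a) > best then (counta + k) * (c + a) else best

def solve (n : Int) (m : Int) (arr : List Int) (pairs : List (Int × Int)) : Int :=
  let ps : PySem.Set (Int × Int) := PySem.Set.ofList pairs
  let counts : PySem.Dict Int Int := arr.foldl (fun d a =>
      let d := if d.contains a then d else d.insert a 0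
      d.insert a (d.getD a 0 + 1)) PySem.Dict.empty
  let ctv : PySem.Dict Int (List Int) := counts.keys.foldl (fun d k =>
      let c := counts.getD k 0
      let d := if d.contains c then d else d.insert c []
      d.insert c (d.getD c [] ++ [k])) PySem.Dict.empty
  let ctv2 : PySem.Dict Int (List Int) := ctv.keys.foldl (fun d k =>
      d.insert k (PySem.List.sorted (d.getD k []) (fun x => x) true)) ctv
  counts.keys.foldl (fun best a =>
    ctv2.keys.foldl (fun best k =>
      scanA ps a (counts.getD a 0) k best (ctv2.getD k [])) best) 0

-- ===== PORT B =====
def solve_alt (n : Int) (m : Int) (arr : List Int) (pairs : List (Int × Int)) : Int :=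
  let forb : PySem.Set (Int × Int) := PySem.Set.ofList pairs
  let counts : PySem.Dict Int Int := arr.foldl (fun d a => d.insert a (d.getD a 0 + 1)) PySem.Dict.empty
  counts.items.foldl (fun best p =>
    counts.items.foldl (fun best q =>
      if p.1 ≠ q.1 ∧ ¬ (forb.contains (p.1, q.1) = true) ∧ ¬ (forb.contains (q.1, p.1) = true)
      then max best ((p.2 + q.2) * (p.1 + q.1)) else best) best) 0

-- ===== PRECONDITION & SPEC =====
def Spec_solve (n : Int) (m : Int) (arr : List Int) (pairs : List (Int × Int)) (out : Int) : Prop := out = solve_alt n m arr pairs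
instance (n : Int) (m : Int) (arr : List Int) (pairs : List (Int × Int)) (out : Int) : Decidable (Spec_solve n m arr pairs out) := by unfold Spec_solve; infer_instance

-- ===== CLAIM (what is proved, stated in full; the proofs are below) =====
def Claim_equal_solve : Prop := ∀ (n : Int) (m : Int) (arr : List Int) (pairs : List (Int × Int)), Dom_solve n m arr pairs → Spec_solve n m arr pairs (solve n m arr pairs)

-- ===== LEMMAS AND PROOFS =====

-- generic "running maximum of optionally-selected values" fold, used to characterise both inner loops
def fmax {α : Type} (sel : α → Option Int) (b : Int) (L : List α) : Int :=
  L.foldl (fun best x => max best ((sel x).getD best)) b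

theorem fmax_nil {α : Type} (sel : α → Option Int) (b : Int) : fmax sel b [] = b := rfl

theorem fmax_cons {α : Type} (sel : α → Option Int) (b : Int) (x : α) (L : List α) :
    fmax sel b (x :: L) = fmax sel (max b ((sel x).getD b)) L := rfl

theorem self_le_fmax {α : Type} (sel : α → Option Int) (b : Int) (L : List α) :
    b ≤ fmax sel b L := by
  induction L generalizing b with
  | nil => simp [fmax_nil]
  | cons x L ih =>
    rw [fmax_cons]
    exact le_trans (le_max_left _ _) (ih _)

theorem le_fmax_of_mem {α : Type} (sel : α → Option Int) (b : Int) (L : List α)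
    (x : α) (v : Int) (hx : x ∈ L) (hsel : sel x = some v) : v ≤ fmax sel b L := by
  induction L generalizing b with
  | nil => cases hx
  | cons y L ih =>
    rw [fmax_cons]
    rcases List.mem_cons.1 hx with h | h
    · subst h
      rw [hsel]
      exact le_trans (le_max_right b v) (self_le_fmax _ _ _)
    · exact ih _ h

theorem fmax_le {α : Type} (sel : α → Option Int) (b M : Int) (L : List α)
    (hb : b ≤ M) (h : ∀ x ∈ L, ∀ v, sel x = some v → v ≤ M) : fmax sel b L ≤ M := by
  induction L generalizing b with
  | nil => simpa [fmax_nil] using hb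
  | cons x L ih =>
    rw [fmax_cons]
    refine ih _ ?_ (fun y hy v hv => h y (List.mem_cons_of_mem _ hy) v hv)
    rcases hsel : sel x with _ | v
    · simpa [hsel] using hb
    · simpa [hsel] using ⟨hb, h x (List.mem_cons_self) v hsel⟩

theorem fmax_eq_fmax {α β : Type} (sel₁ : α → Option Int) (sel₂ : β → Option Int)
    (b : Int) (L₁ : List α) (L₂ : List β)
    (h12 : ∀ x ∈ L₁, ∀ v, sel₁ x = some v → v ≤ fmax sel₂ b L₂)
    (h21 : ∀ x ∈ L₂, ∀ v, sel₂ x = some v → v ≤ fmax sel₁ b L₁) :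
    fmax sel₁ b L₁ = fmax sel₂ b L₂ :=
  le_antisymm (fmax_le _ _ _ _ (self_le_fmax _ _ _) h12)
              (fmax_le _ _ _ _ (self_le_fmax _ _ _) h21)

-- the candidate filter shared by both programs
def validp (ps : List (Int × Int)) (a c : Int) : Bool :=
  !decide (a = c) && !(ps.contains (a, c) || ps.contains (c, a))

theorem validp_iff (ps : List (Int × Int)) (a c : Int) :
    validp ps a c = true ↔
      (a ≠ c ∧ ¬ ps.contains (a, c) = true ∧ ¬ ps.contains (c, a) = true) := by
  simp [validp]

-- A's break-scan = max with the value of the first valid candidate (if any)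
theorem scanA_eq (ps : List (Int × Int)) (a counta k best : Int) (l : List Int) :
    scanA ps a counta k best l =
      max best (((l.find? (validp ps a)).map (fun c => (counta + k) * (c + a))).getD best) := by
  induction l generalizing best with
  | nil => simp [scanA]
  | cons c rest ih =>
    by_cases hac : a = c
    · rw [List.find?_cons_of_neg (by simp [validp, hac])]
      simp only [scanA, if_pos hac]
      exact ih best
    · by_cases hps : (ps.contains (a, c) || ps.contains (c, a)) = true
      · rw [List.find?_cons_of_neg (by unfold validp; rw [hps]; simp)]
        simp only [scanA, if_neg hac, hps, if_true]
        exact ih best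
      · have hps0 : (ps.contains (a, c) || ps.contains (c, a)) = false := by
          revert hps; cases (ps.contains (a, c) || ps.contains (c, a)) <;> simp
        rw [List.find?_cons_of_pos (by unfold validp; rw [hps0]; simp [hac])]
        simp only [scanA, if_neg hac, hps, Bool.false_eq_true, if_false,
          Option.map_some, Option.getD_some]
        omega

-- first match in a descending list is the maximum among matches
theorem find?_max_of_pairwise (l : List Int) (p : Int → Bool) (c : Int)
    (hp : l.Pairwise (fun x y => y ≤ x)) (hfind : l.find? p = some c) :
    ∀ y ∈ l, p y = true → y ≤ c := by
  induction l with
  | nil => simp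
  | cons x l ih =>
    rcases List.pairwise_cons.1 hp with ⟨hx, hl⟩
    intro y hy hpy
    by_cases hpx : p x = true
    · have hc : c = x := by simpa [List.find?_cons, hpx] using hfind.symm
      rcases List.mem_cons.1 hy with h | h
      · omega
      · exact hc ▸ hx y h
    · have hfind' : l.find? p = some c := by simpa [List.find?_cons, hpx] using hfind
      rcases List.mem_cons.1 hy with h | h
      · subst h; simp [hpy] at hpx
      · exact ih hl hfind' y h hpy

-- a fold of inserts over distinct keys, read back
theorem getD_foldl_insert_fun (ks : List Int)
    (d : PySem.Dict Int (List Int)) (j : Int) (hnd : ks.Nodup) :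
    (ks.foldl (fun d k => d.insert k (PySem.List.sorted (d.getD k []) (fun x => x) true)) d).getD j [] =
      if j ∈ ks then PySem.List.sorted (d.getD j []) (fun x => x) true else d.getD j [] := by
  induction ks generalizing d with
  | nil => simp
  | cons k ks ih =>
    rcases List.nodup_cons.1 hnd with ⟨hk, hnd'⟩
    simp only [List.foldl_cons]
    rw [ih _ hnd']
    by_cases hj : j = k
    · subst hj
      simp [hk, PySem.Dict.getD_insert_self]
    · rw [PySem.Dict.getD_insert_of_ne (hne := hj)]
      simp [List.mem_cons, hj]

theorem set_update_self (s : List Int) : PySem.Set.update s s = s := by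
  rw [PySem.Set.update_eq_append_filter]
  have hnil : (PySem.Set.ofList s).filter (fun y => !(PySem.Set.contains s y)) = [] := by
    apply List.filter_eq_nil_iff.2
    intro y hy
    have hys : y ∈ s := (PySem.Set.mem_ofList s y).1 hy
    simpa using hys
  rw [hnil, List.append_nil]

-- proof-side canonical views of the two programs
def grpOf (arr : List Int) (j : Int) : List Int :=
  PySem.List.sorted (((PySem.Dict.counter arr : PySem.Dict Int Int)).keys.filter
    (fun k => (PySem.Dict.counter arr : PySem.Dict Int Int).getD k 0 == j)) (fun x => x) true

def selA (arr : List Int) (pairs : List (Int × Int)) (a j : Int) : Option Int :=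
  ((grpOf arr j).find? (validp (PySem.Set.ofList pairs) a)).map
    (fun c => ((PySem.Dict.counter arr : PySem.Dict Int Int).getD a 0 + j) * (c + a))

def selB (arr : List Int) (pairs : List (Int × Int)) (a c : Int) : Option Int :=
  if validp (PySem.Set.ofList pairs) a c = true then
    some (((PySem.Dict.counter arr : PySem.Dict Int Int).getD a 0 +
           (PySem.Dict.counter arr : PySem.Dict Int Int).getD c 0) * (a + c))
  else none

def gkeysOf (arr : List Int) : List Int :=
  PySem.Set.ofList ((PySem.Dict.counter arr : PySem.Dict Int Int).keys.map
    (fun k => (PySem.Dict.counter arr : PySem.Dict Int Int).getD k 0))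

theorem solve_canon (n m : Int) (arr : List Int) (pairs : List (Int × Int)) :
    solve n m arr pairs =
      (PySem.Dict.counter arr : PySem.Dict Int Int).keys.foldl
        (fun best a => fmax (selA arr pairs a) best (gkeysOf arr)) 0 := by
  -- step 1: the counts loop builds collections.Counter(arr)
  have hcounts : List.foldl
      (fun (d : PySem.Dict Int Int) a =>
        (if d.contains a = true then d else d.insert a 0).insert a
          ((if d.contains a = true then d else d.insert a 0).getD a 0 + 1))
      PySem.Dict.empty arr = PySem.Dict.counter arr := by
    refine Eq.trans (PySem.List.foldl_congr_mem _ _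
      (fun (d : PySem.Dict Int Int) a => d.insert a (d.getD a 0 + 1)) PySem.Dict.empty ?_)
      (PySem.Dict.foldl_insert_getD_add_one_eq_counter arr)
    intro d a _
    by_cases h : d.contains a = true
    · rw [if_pos h]
    · have h' : d.contains a = false := by revert h; cases d.contains a <;> simp
      rw [if_neg h, PySem.Dict.getD_insert_self, PySem.Dict.insert_insert_self]
      simp [PySem.Dict.getD_of_not_contains _ _ h']
  simp only [solve]
  rw [hcounts]
  -- step 2: the grouping loop is a modify-fold keyed by the count
  have hctvstep : List.foldl
      (fun (d : PySem.Dict Int (List Int)) k =>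
        (if d.contains ((PySem.Dict.counter arr : PySem.Dict Int Int).getD k 0) = true then d
         else d.insert ((PySem.Dict.counter arr : PySem.Dict Int Int).getD k 0) []).insert
          ((PySem.Dict.counter arr : PySem.Dict Int Int).getD k 0)
          ((if d.contains ((PySem.Dict.counter arr : PySem.Dict Int Int).getD k 0) = true then d
            else d.insert ((PySem.Dict.counter arr : PySem.Dict Int Int).getD k 0) []).getD
              ((PySem.Dict.counter arr : PySem.Dict Int Int).getD k 0) [] ++ [k]))
      PySem.Dict.empty (PySem.Dict.counter arr : PySem.Dict Int Int).keys =
      List.foldl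
        (fun (d : PySem.Dict Int (List Int)) k =>
          d.modify ((PySem.Dict.counter arr : PySem.Dict Int Int).getD k 0) [] (fun v => v ++ [k]))
        PySem.Dict.empty (PySem.Dict.counter arr : PySem.Dict Int Int).keys := by
    apply PySem.List.foldl_congr_mem
    intro d k _
    by_cases h : d.contains ((PySem.Dict.counter arr : PySem.Dict Int Int).getD k 0) = true
    · rw [if_pos h]; rfl
    · have h' : d.contains ((PySem.Dict.counter arr : PySem.Dict Int Int).getD k 0) = false := by
        revert h
        cases d.contains ((PySem.Dict.counter arr : PySem.Dict Int Int).getD k 0) <;> simp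
      rw [if_neg h, PySem.Dict.getD_insert_self, PySem.Dict.insert_insert_self]
      have h0 : d.getD ((PySem.Dict.counter arr : PySem.Dict Int Int).getD k 0) [] = ([] : List Int) :=
        PySem.Dict.getD_of_not_contains _ _ h'
      simp only [PySem.Dict.modify, h0, List.nil_append]
  rw [hctvstep]
  set cnt : PySem.Dict Int Int := PySem.Dict.counter arr with hcnt
  set ctvT : PySem.Dict Int (List Int) :=
    List.foldl (fun d k => d.modify (cnt.getD k 0) [] (fun v => v ++ [k]))
      PySem.Dict.empty cnt.keys with hctvT
  -- facts about the grouping dict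
  have hctvkeys : ctvT.keys = gkeysOf arr := by
    rw [hctvT, PySem.Dict.keys_foldl_modify_key cnt.keys (fun k => cnt.getD k 0) [] (fun _ k v => v ++ [k])]
    rw [PySem.Dict.keys_empty, PySem.Set.update_nil_left]
    rfl
  have hctvnodup : ctvT.keys.Nodup := by
    rw [hctvT]
    exact PySem.Dict.nodup_keys_foldl_modify_key cnt.keys (fun k => cnt.getD k 0) []
      (fun _ k v => v ++ [k]) PySem.Dict.empty PySem.Dict.nodup_keys_empty
  have hctvgetD : ∀ j, ctvT.getD j [] = cnt.keys.filter (fun k => cnt.getD k 0 == j) := by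
    intro j
    have hmapped : ctvT = List.foldl (fun (d : PySem.Dict Int (List Int)) p => d.modify p.1 [] (fun v => v ++ [p.2]))
        PySem.Dict.empty (cnt.keys.map (fun k => ((cnt.getD k 0 : Int), k))) := by
      rw [hctvT, List.foldl_map]
    rw [hmapped, PySem.Dict.getD_foldl_modify_append]
    simp [List.filter_map, Function.comp_def]
  -- facts about the per-group sorting loop
  have h2keys : (List.foldl (fun (d : PySem.Dict Int (List Int)) k =>
      d.insert k (PySem.List.sorted (d.getD k []) (fun x => x) true)) ctvT ctvT.keys).keys = ctvT.keys := by
    rw [PySem.Dict.keys_foldl_insert ctvT.keys (fun d k => PySem.List.sorted (d.getD k []) (fun x => x) true) ctvT]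
    exact set_update_self _
  have h2getD : ∀ j, (List.foldl (fun (d : PySem.Dict Int (List Int)) k =>
      d.insert k (PySem.List.sorted (d.getD k []) (fun x => x) true)) ctvT ctvT.keys).getD j [] = grpOf arr j := by
    intro j
    rw [getD_foldl_insert_fun _ _ _ hctvnodup, hctvgetD j]
    by_cases hj : j ∈ ctvT.keys
    · rw [if_pos hj]
      rfl
    · rw [if_neg hj]
      have hfil : cnt.keys.filter (fun k => cnt.getD k 0 == j) = [] := by
        apply List.filter_eq_nil_iff.2
        intro k hk hkj
        apply hj
        rw [hctvkeys]
        unfold gkeysOf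
        exact (PySem.Set.mem_ofList _ _).2 (List.mem_map.2 ⟨k, hk, beq_iff_eq.mp hkj⟩)
      rw [hfil]
      unfold grpOf
      rw [← hcnt, hfil]
      rfl
  -- step 3: the scan-with-break loop is the running maximum fmax over selA
  apply PySem.List.foldl_congr_mem
  intro best a _
  have hbody : ∀ (b j : Int), scanA (PySem.Set.ofList pairs) a (cnt.getD a 0) j b
      ((List.foldl (fun (d : PySem.Dict Int (List Int)) k =>
        d.insert k (PySem.List.sorted (d.getD k []) (fun x => x) true)) ctvT ctvT.keys).getD j []) =
      max b ((selA arr pairs a j).getD b) := by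
    intro b j
    rw [scanA_eq, h2getD j]
    rfl
  rw [PySem.List.foldl_congr_mem _ _ (fun b j => max b ((selA arr pairs a j).getD b)) best
      (fun b j _ => hbody b j), h2keys, hctvkeys]
  rfl

theorem alt_canon (n m : Int) (arr : List Int) (pairs : List (Int × Int)) :
    solve_alt n m arr pairs =
      (PySem.Dict.counter arr : PySem.Dict Int Int).keys.foldl
        (fun best a => fmax (selB arr pairs a) best
          (PySem.Dict.counter arr : PySem.Dict Int Int).keys) 0 := by
  simp only [solve_alt]
  rw [PySem.Dict.foldl_insert_getD_add_one_eq_counter,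
    PySem.Dict.items_eq_map_keys _ (PySem.Dict.nodup_keys_counter arr) 0,
    List.foldl_map]
  apply PySem.List.foldl_congr_mem
  intro best a _
  rw [List.foldl_map]
  apply PySem.List.foldl_congr_mem
  intro b c _
  simp only [PySem.Set.contains_eq_listContains]
  unfold selB
  by_cases hval : validp (PySem.Set.ofList pairs) a c = true
  · rw [if_pos hval, Option.getD_some, if_pos ((validp_iff _ _ _).1 hval)]
  · rw [if_neg hval, Option.getD_none,
      if_neg (fun h => hval ((validp_iff _ _ _).2 h)), max_self]

theorem mem_grpOf (arr : List Int) (j c : Int) :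
    c ∈ grpOf arr j ↔
      c ∈ (PySem.Dict.counter arr : PySem.Dict Int Int).keys ∧
        (PySem.Dict.counter arr : PySem.Dict Int Int).getD c 0 = j := by
  unfold grpOf
  rw [PySem.List.mem_sorted, List.mem_filter]
  simp

theorem inner_eq (arr : List Int) (pairs : List (Int × Int)) (a best : Int) :
    fmax (selA arr pairs a) best (gkeysOf arr) =
      fmax (selB arr pairs a) best (PySem.Dict.counter arr : PySem.Dict Int Int).keys := by
  have hnn : ∀ x : Int, 0 ≤ (PySem.Dict.counter arr : PySem.Dict Int Int).getD x 0 := by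
    intro x
    rw [PySem.Dict.getD_counter]
    positivity
  refine fmax_eq_fmax _ _ best _ _ ?_ ?_
  · -- every value A's scan picks is also one of B's candidates
    intro j hj v hv
    unfold selA at hv
    rcases Option.map_eq_some_iff.1 hv with ⟨c₀, hfind, hval⟩
    have hc₀p : validp (PySem.Set.ofList pairs) a c₀ = true := List.find?_some hfind
    rcases (mem_grpOf arr j c₀).1 (List.mem_of_find?_eq_some hfind) with ⟨hc₀K, hc₀j⟩
    apply le_fmax_of_mem _ _ _ c₀ v hc₀K
    unfold selB
    rw [if_pos hc₀p, hc₀j, ← hval, add_comm c₀ a]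
  · -- every one of B's candidates is dominated by A's pick for its count-group
    intro c hc v hv
    unfold selB at hv
    by_cases hval : validp (PySem.Set.ofList pairs) a c = true
    · rw [if_pos hval, Option.some_inj] at hv
      have hjg : (PySem.Dict.counter arr : PySem.Dict Int Int).getD c 0 ∈ gkeysOf arr := by
        unfold gkeysOf
        exact (PySem.Set.mem_ofList _ _).2 (List.mem_map.2 ⟨c, hc, rfl⟩)
      have hcg : c ∈ grpOf arr ((PySem.Dict.counter arr : PySem.Dict Int Int).getD c 0) :=
        (mem_grpOf arr _ c).2 ⟨hc, rfl⟩
      obtain ⟨c₀, hfind⟩ : ∃ c₀, (grpOf arr ((PySem.Dict.counter arr : PySem.Dict Int Int).getD c 0)).find?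
          (validp (PySem.Set.ofList pairs) a) = some c₀ :=
        Option.isSome_iff_exists.1 (List.find?_isSome.2 ⟨c, hcg, hval⟩)
      have hdesc : (grpOf arr ((PySem.Dict.counter arr : PySem.Dict Int Int).getD c 0)).Pairwise
          (fun x y => y ≤ x) := PySem.List.sorted_pairwise_rev _ _
      have hle : c ≤ c₀ := find?_max_of_pairwise _ _ _ hdesc hfind c hcg hval
      have hselA : selA arr pairs a ((PySem.Dict.counter arr : PySem.Dict Int Int).getD c 0) =
          some (((PySem.Dict.counter arr : PySem.Dict Int Int).getD a 0 +
                 (PySem.Dict.counter arr : PySem.Dict Int Int).getD c 0) * (c₀ + a)) := by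
        unfold selA
        rw [hfind]
        rfl
      refine le_trans ?_ (le_fmax_of_mem _ best _ _ _ hjg hselA)
      rw [← hv, add_comm c₀ a]
      exact mul_le_mul_of_nonneg_left (by omega) (by have := hnn a; have := hnn c; omega)
    · simp [hval] at hv

theorem solve_eq_solve_alt (n m : Int) (arr : List Int) (pairs : List (Int × Int)) :
    solve n m arr pairs = solve_alt n m arr pairs := by
  rw [solve_canon n m arr pairs, alt_canon n m arr pairs]
  exact PySem.List.foldl_congr_mem _ _ _ 0 (fun best a _ => inner_eq arr pairs a best)

-- ===== VERDICT (by name: the statement is the Claim_ definition above) =====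
theorem solve_spec : Claim_equal_solve := by
  intro n m arr pairs _
  unfold Spec_solve
  exact solve_eq_solve_alt n m arr pairs
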